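-- pv_equiv track=rewrite | github.com/jonrosenberg/adventofcode | 2018/Day03/a.py | mark_fabric
-- ===== SOURCE A (Python) =====
-- def mark_fabric(fabric, claim_id, left_edge, top_edge, width, height):
--     # check if there is overlap
--     overlap=False
--     # Mark the fabric claimed by a specific claim ID
--     for i in range(left_edge, left_edge + width):
--         for j in range(top_edge, top_edge + height):
--             if fabric[i][j] == 0:
--                 fabric[i][j] = claim_id
--             else:
--                 fabric[i][j] = -1  # Overlapping claim
--                 overlap = True
--     return overlap
-- ===== SOURCE B (Python) =====
-- def mark_fabric(fabric, claim_id, left_edge, top_edge, width, height):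
--     # Pass 1 (read-only): is any cell in the rectangle already claimed?
--     overlap = any(fabric[i][j] != 0
--                   for i in range(left_edge, left_edge + width)
--                   for j in range(top_edge, top_edge + height))
--     # Pass 2 (write-only): mark the rectangle.
--     for i in range(left_edge, left_edge + width):
--         for j in range(top_edge, top_edge + height):
--             fabric[i][j] = claim_id if fabric[i][j] == 0 else -1
--     return overlap
-- ===== Notes on version B (the rewrite author's own statement) =====
-- stated objective: alternative
-- what changed: A's single combined pass that reads and writes each cell is split into a read-only any() scan that computes the overlap flag followed by a separate write-only marking pass.
-- outside the precondition, e.g. on mark_fabric([[0], [0]], 5, -2, 0, 4, 1): A returns True, B returns False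
import Mathlib
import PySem

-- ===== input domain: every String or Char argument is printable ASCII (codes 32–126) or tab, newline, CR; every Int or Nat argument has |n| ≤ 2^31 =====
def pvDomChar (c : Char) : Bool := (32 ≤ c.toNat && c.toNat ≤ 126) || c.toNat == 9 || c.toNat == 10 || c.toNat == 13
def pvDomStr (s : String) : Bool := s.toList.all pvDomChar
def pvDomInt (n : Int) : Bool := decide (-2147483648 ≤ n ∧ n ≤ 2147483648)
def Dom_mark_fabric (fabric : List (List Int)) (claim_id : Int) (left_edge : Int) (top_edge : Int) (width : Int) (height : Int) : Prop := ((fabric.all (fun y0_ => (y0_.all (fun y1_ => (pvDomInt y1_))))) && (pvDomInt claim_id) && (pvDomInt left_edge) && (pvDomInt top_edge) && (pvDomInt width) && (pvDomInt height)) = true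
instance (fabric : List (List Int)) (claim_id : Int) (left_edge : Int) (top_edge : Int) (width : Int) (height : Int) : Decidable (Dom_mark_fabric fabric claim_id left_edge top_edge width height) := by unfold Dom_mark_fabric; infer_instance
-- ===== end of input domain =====

-- B replaces A's single read-and-write pass by a read-only overlap scan followed by a write-only
-- marking pass (objective: alternative decomposition). Both Pythons mutate `fabric` in place in the
-- same way on Pre_; the equivalence proved here is about the RETURN value.

-- ===== PORT A =====
-- fabric[i][j] read via pyGetD / written via pySetD (exact on Pre_, where all indices are in range)
def markInnerA (claim_id : Int) (i : Int) (st : List (List Int) × Bool) (j : Int) : List (List Int) × Bool :=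
  let row := PySem.List.pyGetD st.1 i []
  if PySem.List.pyGetD row j 0 = 0 then
    (PySem.List.pySetD st.1 i (PySem.List.pySetD row j claim_id), st.2)
  else
    (PySem.List.pySetD st.1 i (PySem.List.pySetD row j (-1)), true)

def mark_fabric (fabric : List (List Int)) (claim_id : Int) (left_edge : Int) (top_edge : Int) (width : Int) (height : Int) : Bool :=
  ((PySem.List.pyRange left_edge (left_edge + width) 1).foldl
    (fun st i =>
      (PySem.List.pyRange top_edge (top_edge + height) 1).foldl (markInnerA claim_id i) st)
    (fabric, false)).2

-- ===== PORT B =====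
def readCell (f : List (List Int)) (i j : Int) : Int :=
  PySem.List.pyGetD (PySem.List.pyGetD f i []) j 0

def markCellB (claim_id : Int) (f : List (List Int)) (i j : Int) : List (List Int) :=
  let row := PySem.List.pyGetD f i []
  PySem.List.pySetD f i
    (PySem.List.pySetD row j (if PySem.List.pyGetD row j 0 = 0 then claim_id else (-1)))

def mark_fabric_alt (fabric : List (List Int)) (claim_id : Int) (left_edge : Int) (top_edge : Int) (width : Int) (height : Int) : Bool :=
  -- pass 1: read-only overlap scan
  let overlap := (PySem.List.pyRange left_edge (left_edge + width) 1).any (fun i =>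
    (PySem.List.pyRange top_edge (top_edge + height) 1).any (fun j =>
      readCell fabric i j != 0))
  -- pass 2: write-only marking (the in-place mutation; it does not feed the return value)
  let _marked := (PySem.List.pyRange left_edge (left_edge + width) 1).foldl
    (fun f i =>
      (PySem.List.pyRange top_edge (top_edge + height) 1).foldl
        (fun f j => markCellB claim_id f i j) f)
    fabric
  overlap

-- ===== PRECONDITION & SPEC =====
-- Pre_ excludes rectangles that reach outside the fabric (A raises IndexError) and, with it,
-- negative left/top edges, where Python's negative-index wraparound can make A re-read a cell its
-- marking pass has just written — an accident of in-place marking that B's separate read-only pass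
-- does not reproduce.
def Pre_mark_fabric (fabric : List (List Int)) (claim_id : Int) (left_edge : Int) (top_edge : Int) (width : Int) (height : Int) : Prop :=
  0 < width → 0 < height →
    0 ≤ left_edge ∧ left_edge + width ≤ (fabric.length : Int) ∧ 0 ≤ top_edge ∧
    ∀ i ∈ PySem.List.pyRange left_edge (left_edge + width) 1,
      top_edge + height ≤ ((PySem.List.pyGetD fabric i []).length : Int)
instance (fabric : List (List Int)) (claim_id : Int) (left_edge : Int) (top_edge : Int) (width : Int) (height : Int) : Decidable (Pre_mark_fabric fabric claim_id left_edge top_edge width height) := by unfold Pre_mark_fabric; infer_instance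

def pvWitness_mark_fabric : List (List Int) × Int × Int × Int × Int × Int :=
  ([[0, 0, 0], [0, 7, 0], [0, 0, 0]], 4, 0, 1, 2, 2)

def Spec_mark_fabric (fabric : List (List Int)) (claim_id : Int) (left_edge : Int) (top_edge : Int) (width : Int) (height : Int) (out : Bool) : Prop := out = mark_fabric_alt fabric claim_id left_edge top_edge width height
instance (fabric : List (List Int)) (claim_id : Int) (left_edge : Int) (top_edge : Int) (width : Int) (height : Int) (out : Bool) : Decidable (Spec_mark_fabric fabric claim_id left_edge top_edge width height out) := by unfold Spec_mark_fabric; infer_instance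

-- ===== CLAIM (what is proved, stated in full; the proofs are below) =====
def Claim_equal_mark_fabric : Prop := ∀ (fabric : List (List Int)) (claim_id : Int) (left_edge : Int) (top_edge : Int) (width : Int) (height : Int), Dom_mark_fabric fabric claim_id left_edge top_edge width height → Pre_mark_fabric fabric claim_id left_edge top_edge width height → Spec_mark_fabric fabric claim_id left_edge top_edge width height (mark_fabric fabric claim_id left_edge top_edge width height)

-- ===== LEMMAS AND PROOFS =====

theorem foldl_id {α β : Type} (s : α) (l : List β) : l.foldl (fun s _ => s) s = s := by
  induction l with
  | nil => rfl
  | cons x xs ih => simp only [List.foldl_cons]; exact ih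

theorem length_set_row (f : List (List Int)) (i : Int) (r : List Int) (h0 : 0 ≤ i) :
    (PySem.List.pySetD f i r).length = f.length := by
  rw [PySem.List.pySetD_of_nonneg f r h0]; simp

-- a write to a nonnegative index leaves reads at a different nonnegative index unchanged
theorem pyGetD_pySetD_ne {α : Type} (xs : List α) (i i' : Int) (v d : α)
    (h0 : 0 ≤ i) (h0' : 0 ≤ i') (hne : i ≠ i') :
    PySem.List.pyGetD (PySem.List.pySetD xs i v) i' d = PySem.List.pyGetD xs i' d := by
  rw [PySem.List.pySetD_of_nonneg xs v h0]
  simp only [PySem.List.pyGetD, PySem.List.pyGet?_of_nonneg _ h0']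
  rw [List.getElem?_set_ne (by omega)]

-- an in-range write to row i is what a later read of row i sees
theorem pyGetD_pySetD_self (f : List (List Int)) (i : Int) (r : List Int)
    (h0 : 0 ≤ i) (hl : i < (f.length : Int)) :
    PySem.List.pyGetD (PySem.List.pySetD f i r) i [] = r := by
  rw [PySem.List.pySetD_of_nonneg f r h0]
  simp only [PySem.List.pyGetD, PySem.List.pyGet?_of_nonneg _ h0]
  rw [List.getElem?_set_self (by omega)]
  simp

theorem readCell_set_ne_row (f : List (List Int)) (i i' : Int) (r : List Int) (j' : Int)
    (h0 : 0 ≤ i) (h0' : 0 ≤ i') (hne : i ≠ i') :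
    readCell (PySem.List.pySetD f i r) i' j' = readCell f i' j' := by
  unfold readCell
  rw [pyGetD_pySetD_ne f i i' r [] h0 h0' hne]

theorem readCell_set_ne_col (f : List (List Int)) (i : Int) (j j' : Int) (v : Int)
    (hi0 : 0 ≤ i) (hilen : i < (f.length : Int))
    (hj0 : 0 ≤ j) (hj0' : 0 ≤ j') (hne : j ≠ j') :
    readCell (PySem.List.pySetD f i (PySem.List.pySetD (PySem.List.pyGetD f i []) j v)) i j'
      = readCell f i j' := by
  unfold readCell
  rw [pyGetD_pySetD_self f i _ hi0 hilen,
      pyGetD_pySetD_ne (PySem.List.pyGetD f i []) j j' v 0 hj0 hj0' hne]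

-- inner loop of A: its flag becomes b OR "some cell (i, j), j ∈ js, is nonzero in f0";
-- it only changes row i and preserves the number of rows
theorem innerA_spec (claim_id : Int) (i : Int) (hi0 : 0 ≤ i) :
    ∀ (js : List Int) (f f0 : List (List Int)) (b : Bool),
      i < (f.length : Int) →
      js.Pairwise (· ≠ ·) → (∀ j ∈ js, 0 ≤ j) →
      (∀ j ∈ js, readCell f i j = readCell f0 i j) →
      (js.foldl (markInnerA claim_id i) (f, b)).2
          = (b || js.any (fun j => readCell f0 i j != 0))
        ∧ (js.foldl (markInnerA claim_id i) (f, b)).1.length = f.length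
        ∧ ∀ i' j', 0 ≤ i' → i' ≠ i →
            readCell (js.foldl (markInnerA claim_id i) (f, b)).1 i' j' = readCell f i' j' := by
  intro js
  induction js with
  | nil => intro f f0 b _ _ _ _; exact ⟨by simp, rfl, fun _ _ _ _ => rfl⟩
  | cons j js ih =>
    intro f f0 b hlen hpw hnn hagree
    have hj0 : 0 ≤ j := hnn j (by simp)
    have hjne : ∀ j' ∈ js, j ≠ j' := (List.pairwise_cons.mp hpw).1
    -- the state after processing j, uniformly over the two branches
    have hstep : ∃ w, markInnerA claim_id i (f, b) j
        = (PySem.List.pySetD f i (PySem.List.pySetD (PySem.List.pyGetD f i []) j w),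
           b || (readCell f i j != 0)) := by
      unfold markInnerA readCell
      by_cases hv : PySem.List.pyGetD (PySem.List.pyGetD f i []) j 0 = 0
      · exact ⟨claim_id, by simp [hv]⟩
      · exact ⟨-1, by simp [hv]⟩
    obtain ⟨w, hw⟩ := hstep
    set F := PySem.List.pySetD f i (PySem.List.pySetD (PySem.List.pyGetD f i []) j w) with hF
    have hFlen : F.length = f.length := length_set_row f i _ hi0
    have hFread : ∀ j' ∈ js, readCell F i j' = readCell f0 i j' := by
      intro j' hj'
      rw [readCell_set_ne_col f i j j' w hi0 hlen hj0 (hnn j' (by simp [hj'])) (hjne j' hj')]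
      exact hagree j' (by simp [hj'])
    have ihF := ih F f0 (b || (readCell f i j != 0)) (by rw [hFlen]; exact hlen)
      (List.pairwise_cons.mp hpw).2 (fun j' hj' => hnn j' (by simp [hj'])) hFread
    refine ⟨?_, ?_, ?_⟩
    · rw [List.foldl_cons, hw, ihF.1, hagree j (by simp), List.any_cons, Bool.or_assoc]
    · rw [List.foldl_cons, hw, ihF.2.1, hFlen]
    · intro i' j' hi0' hne
      rw [List.foldl_cons, hw, ihF.2.2 i' j' hi0' hne,
          readCell_set_ne_row f i i' _ j' hi0 hi0' (fun h => hne h.symm)]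

-- outer loop of A over pairwise-distinct in-range rows: the flag is an OR over the whole rectangle
theorem outerA_spec (claim_id top_edge height : Int) (ht0 : 0 ≤ top_edge) :
    ∀ (is : List Int) (f f0 : List (List Int)) (b : Bool),
      is.Pairwise (· ≠ ·) →
      (∀ i ∈ is, 0 ≤ i ∧ i < (f.length : Int)) →
      (∀ i ∈ is, ∀ j, readCell f i j = readCell f0 i j) →
      (is.foldl (fun st i =>
          (PySem.List.pyRange top_edge (top_edge + height) 1).foldl (markInnerA claim_id i) st)
        (f, b)).2
        = (b || is.any (fun i =>
            (PySem.List.pyRange top_edge (top_edge + height) 1).any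
              (fun j => readCell f0 i j != 0))) := by
  intro is
  induction is with
  | nil => intro f f0 b _ _ _; simp
  | cons i is ih =>
    intro f f0 b hpw hbd hagree
    have hi := hbd i (by simp)
    have hinner := innerA_spec claim_id i hi.1
      (PySem.List.pyRange top_edge (top_edge + height) 1) f f0 b hi.2
      ((PySem.List.pairwise_lt_pyRange_one top_edge (top_edge + height)).imp ne_of_lt)
      (fun j hj => le_trans ht0 ((PySem.List.mem_pyRange_one.mp hj).1))
      (fun j _ => hagree i (by simp) j)
    set st := (PySem.List.pyRange top_edge (top_edge + height) 1).foldl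
      (markInnerA claim_id i) (f, b) with hst
    have hine : ∀ i' ∈ is, i' ≠ i := fun i' h => ((List.pairwise_cons.mp hpw).1 i' h).symm
    have hmk : st = (st.1, st.2) := rfl
    rw [List.foldl_cons, ← hst, hmk,
        ih st.1 f0 st.2 (List.pairwise_cons.mp hpw).2
          (fun i' h => ⟨(hbd i' (by simp [h])).1, by rw [hinner.2.1]; exact (hbd i' (by simp [h])).2⟩)
          (fun i' h j => by
            rw [hinner.2.2 i' j (hbd i' (by simp [h])).1 (hine i' h)]
            exact hagree i' (by simp [h]) j),
        hinner.1, List.any_cons, Bool.or_assoc]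

-- ===== VERDICT (by name: the statement is the Claim_ definition above) =====
theorem mark_fabric_spec : Claim_equal_mark_fabric := by
  intro fabric claim_id left_edge top_edge width height _ hpre
  unfold Spec_mark_fabric mark_fabric mark_fabric_alt
  by_cases hw : 0 < width
  · by_cases hh : 0 < height
    · obtain ⟨hl0, hlw, ht0, _⟩ := hpre hw hh
      rw [outerA_spec claim_id top_edge height ht0
            (PySem.List.pyRange left_edge (left_edge + width) 1) fabric fabric false
            ((PySem.List.pairwise_lt_pyRange_one left_edge (left_edge + width)).imp ne_of_lt)
            (fun i hi => by
              have := PySem.List.mem_pyRange_one.mp hi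
              exact ⟨le_trans hl0 this.1, by omega⟩)
            (fun _ _ _ => rfl)]
      simp
    · simp only [PySem.List.pyRange_one_eq_nil (show top_edge + height ≤ top_edge by omega),
        List.foldl_nil, List.any_nil, foldl_id]
      simp
  · simp [PySem.List.pyRange_one_eq_nil (show left_edge + width ≤ left_edge by omega)]
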